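-- pv_equiv track=rewrite | github.com/thaReal/MasterChef | codeforces/round_645/isolation.py | solve
-- ===== SOURCE A (Python) =====
-- from collections import Counter
--
-- def solve(n, a):
-- 	cntr = Counter(a)
-- 	glist = list(cntr.keys())
-- 	glist.sort()
-- 	grannies = 1
--
-- 	gacc = 0
-- 	for i in range(len(glist)):
-- 		gmin = glist[i]
-- 		ngrannies = cntr[gmin] + grannies + gacc
-- 		if ngrannies > gmin:
-- 			grannies += cntr[gmin] + gacc
-- 			gacc = 0
-- 		else:
-- 			gacc += cntr[gmin]
--
--
-- 	return grannies
-- ===== SOURCE B (Python) =====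
-- def solve(n, a):
--     s = sorted(a)
--     best = 0
--     for i, v in enumerate(s):
--         if v <= i + 1:
--             best = i + 1
--     return best + 1
-- ===== Notes on version B (the rewrite author's own statement) =====
-- stated objective: simpler
-- what changed: B drops the Counter of unique keys and the grannies/gacc accumulator entirely: it sorts the full list (duplicates kept) and does one scan recording the largest position i with a_sorted[i] <= i+1, returning that position + 1.
import Mathlib
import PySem

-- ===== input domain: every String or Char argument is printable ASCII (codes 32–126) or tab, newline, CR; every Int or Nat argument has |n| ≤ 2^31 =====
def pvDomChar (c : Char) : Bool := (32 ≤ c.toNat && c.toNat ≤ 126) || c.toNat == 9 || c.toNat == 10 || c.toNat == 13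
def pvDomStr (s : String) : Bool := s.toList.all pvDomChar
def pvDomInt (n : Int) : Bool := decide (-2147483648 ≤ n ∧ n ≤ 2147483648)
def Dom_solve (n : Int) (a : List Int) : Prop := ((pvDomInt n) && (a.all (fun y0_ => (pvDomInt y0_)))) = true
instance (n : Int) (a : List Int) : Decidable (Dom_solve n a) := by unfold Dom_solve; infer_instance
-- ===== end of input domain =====

-- B replaces A's Counter-of-unique-keys accumulator loop by the canonical threshold scan
-- over the sorted full list (simpler: no Counter, no gacc bookkeeping); same return value.

-- ===== PORT A =====
def solve (n : Int) (a : List Int) : Int :=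
  let cntr := PySem.Dict.counter a
  let glist := PySem.List.sorted cntr.keys (fun x => x) false
  let st := (PySem.List.pyRange 0 (glist.length : Int) 1).foldl
    (fun (st : Int × Int) i =>
      let gmin := PySem.List.pyGetD glist i 0
      let ngrannies := cntr.getD gmin 0 + st.1 + st.2
      if ngrannies > gmin then (st.1 + (cntr.getD gmin 0 + st.2), 0)
      else (st.1, st.2 + cntr.getD gmin 0)) ((1 : Int), (0 : Int))
  st.1

-- ===== PORT B =====
def solve_alt (n : Int) (a : List Int) : Int :=
  let s := PySem.List.sorted a (fun x => x) false
  let best := (PySem.List.enumerate s).foldl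
    (fun (best : Int) (iv : Int × Int) => if iv.2 ≤ iv.1 + 1 then iv.1 + 1 else best) 0
  best + 1

-- ===== PRECONDITION & SPEC =====
def Spec_solve (n : Int) (a : List Int) (out : Int) : Prop := out = solve_alt n a
instance (n : Int) (a : List Int) (out : Int) : Decidable (Spec_solve n a out) := by unfold Spec_solve; infer_instance

-- ===== CLAIM (what is proved, stated in full; the proofs are below) =====
def Claim_equal_solve : Prop := ∀ (n : Int) (a : List Int), Dom_solve n a → Spec_solve n a (solve n a)

-- ===== LEMMAS AND PROOFS =====

-- A's per-value step, with the Counter lookup already rewritten to a.count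
def stepA (a : List Int) (st : Int × Int) (v : Int) : Int × Int :=
  if (a.count v : Int) + st.1 + st.2 > v then (st.1 + ((a.count v : Int) + st.2), (0 : Int))
  else (st.1, st.2 + (a.count v : Int))

-- B's per-position step
def stepB (best : Int) (iv : Int × Int) : Int :=
  if iv.2 ≤ iv.1 + 1 then iv.1 + 1 else best

lemma count_flatMap_replicate (glist : List Int) (cnt : Int → Nat) (h : glist.Nodup) (x : Int) :
    (glist.flatMap fun v => List.replicate (cnt v) v).count x = if x ∈ glist then cnt x else 0 := by
  induction glist with
  | nil => simp
  | cons v rest ih =>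
    simp only [List.flatMap_cons, List.count_append, List.count_replicate, List.mem_cons]
    rcases List.nodup_cons.mp h with ⟨hv, hrest⟩
    rw [ih hrest]
    by_cases hxv : x = v
    · subst hxv; simp [hv]
    · have hne : (v == x) = false := beq_eq_false_iff_ne.mpr (fun h' => hxv h'.symm)
      simp [hxv, hne]

lemma pairwise_flatMap_replicate (glist : List Int) (cnt : Int → Nat)
    (h : glist.Pairwise (· < ·)) :
    (glist.flatMap fun v => List.replicate (cnt v) v).Pairwise (· ≤ ·) := by
  induction glist with
  | nil => simp
  | cons v rest ih =>
    rcases List.pairwise_cons.mp h with ⟨hv, hrest⟩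
    simp only [List.flatMap_cons]
    rw [List.pairwise_append]
    refine ⟨?_, ih hrest, ?_⟩
    · rw [List.pairwise_replicate]
      right; exact le_refl v
    · intro x hx y hy
      rcases List.eq_of_mem_replicate hx with rfl
      obtain ⟨u, hu, hyu⟩ := List.mem_flatMap.mp hy
      rcases List.eq_of_mem_replicate hyu with rfl
      exact le_of_lt (hv _ hu)

-- a sorted full list is the blocks of the sorted distinct values
lemma sorted_eq_blocks (a : List Int) :
    PySem.List.sorted a (fun x => x) false
      = (PySem.List.sorted (PySem.Set.ofList a) (fun x => x) false).flatMap
          (fun v => List.replicate (a.count v) v) := by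
  set glist := PySem.List.sorted (PySem.Set.ofList a) (fun x => x) false with hg
  have hpw : glist.Pairwise (· < ·) := PySem.List.sorted_ofList_pairwise_lt a
  have hnd : glist.Nodup := hpw.imp ne_of_lt
  have hmem : ∀ v, v ∈ glist ↔ v ∈ a := by
    intro v
    rw [hg, PySem.List.mem_sorted, PySem.Set.mem_ofList]
  have hperm : (glist.flatMap fun v => List.replicate (a.count v) v).Perm a := by
    rw [List.perm_iff_count]
    intro x
    rw [count_flatMap_replicate glist _ hnd]
    by_cases hx : x ∈ glist
    · simp [hx]
    · simp only [hx, if_false]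
      exact (List.count_eq_zero.mpr (fun hxa => hx ((hmem x).mpr hxa))).symm
  exact PySem.List.sorted_id_eq_of_perm_of_pairwise _ _ hperm
    (pairwise_flatMap_replicate glist _ hpw)

-- B over one block of c equal values v, positions k0+1 .. k0+c
lemma bblock (v : Int) : ∀ (c : Nat), 1 ≤ c → ∀ (k0 best : Int),
    (PySem.List.enumerate (List.replicate c v) k0).foldl stepB best
      = if v ≤ k0 + (c : Int) then k0 + (c : Int) else best := by
  intro c
  induction c with
  | zero => omega
  | succ c ih =>
    intro _ k0 best
    rw [List.replicate_succ, PySem.List.enumerate_cons, List.foldl_cons]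
    by_cases hc : 1 ≤ c
    · rw [ih hc (k0 + 1)]
      unfold stepB
      push_cast
      split_ifs <;> simp_all <;> omega
    · have hc0 : c = 0 := by omega
      subst hc0
      simp only [List.replicate_zero, PySem.List.enumerate_nil, List.foldl_nil]
      unfold stepB
      push_cast
      split_ifs <;> simp_all

-- the main invariant: A's (grannies, gacc) vs B's best
lemma main_inv (a : List Int) : ∀ (glist : List Int) (k0 best : Int),
    (∀ v ∈ glist, v ∈ a) → 0 ≤ best → best ≤ k0 →
    glist.foldl (stepA a) (best + 1, k0 - best)
      = ((PySem.List.enumerate (glist.flatMap fun v => List.replicate (a.count v) v) k0).foldl stepB best + 1,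
         k0 + ((glist.map (fun v => (a.count v : Int))).sum)
           - (PySem.List.enumerate (glist.flatMap fun v => List.replicate (a.count v) v) k0).foldl stepB best)
      ∧ best ≤ (PySem.List.enumerate (glist.flatMap fun v => List.replicate (a.count v) v) k0).foldl stepB best
      ∧ (PySem.List.enumerate (glist.flatMap fun v => List.replicate (a.count v) v) k0).foldl stepB best
          ≤ k0 + ((glist.map (fun v => (a.count v : Int))).sum) := by
  intro glist
  induction glist with
  | nil => intro k0 best _ h0 hk; simp; omega
  | cons v rest ih =>
    intro k0 best hmem h0 hk
    have hc : 1 ≤ a.count v := List.count_pos_iff.mpr (hmem v (by simp))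
    simp only [List.flatMap_cons, PySem.List.enumerate_append, List.foldl_append,
      List.map_cons, List.sum_cons, List.length_replicate]
    rw [bblock v (a.count v) hc k0 best]
    set c : Int := (a.count v : Int) with hcdef
    have hc1 : 1 ≤ c := by rw [hcdef]; exact_mod_cast hc
    set best1 : Int := if v ≤ k0 + c then k0 + c else best with hb1
    have hstep : stepA a (best + 1, k0 - best) v = (best1 + 1, k0 + c - best1) := by
      unfold stepA
      rw [← hcdef, hb1]
      split_ifs <;> simp <;> omega
    rw [List.foldl_cons, hstep]
    have h01 : 0 ≤ best1 := by rw [hb1]; split_ifs <;> omega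
    have hk1 : best1 ≤ k0 + c := by rw [hb1]; split_ifs <;> omega
    have := ih (k0 + c) best1 (fun u hu => hmem u (by simp [hu])) h01 hk1
    rcases this with ⟨heq, hlo, hhi⟩
    refine ⟨?_, ?_, ?_⟩
    · rw [heq]
      simp only [Prod.mk.injEq]
      exact ⟨trivial, by ring⟩
    · exact le_trans (by rw [hb1]; split_ifs <;> omega) hlo
    · calc _ ≤ k0 + c + ((rest.map (fun v => (a.count v : Int))).sum) := hhi
        _ = _ := by ring
  
theorem solve_spec : Claim_equal_solve := by
  intro n a _
  unfold Spec_solve solve solve_alt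
  simp only
  rw [show (fun (best : Int) (iv : Int × Int) => if iv.2 ≤ iv.1 + 1 then iv.1 + 1 else best)
        = stepB from rfl]
  rw [PySem.List.foldl_pyRange_zero_pyGetD' _ 0
      (fun (st : Int × Int) (gmin : Int) =>
        if (PySem.Dict.counter a).getD gmin 0 + st.1 + st.2 > gmin
        then (st.1 + ((PySem.Dict.counter a).getD gmin 0 + st.2), (0:Int))
        else (st.1, st.2 + (PySem.Dict.counter a).getD gmin 0)) ((1:Int),(0:Int))]
  have h2 : (fun (st : Int × Int) (gmin : Int) =>
        if (PySem.Dict.counter a).getD gmin 0 + st.1 + st.2 > gmin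
        then (st.1 + ((PySem.Dict.counter a).getD gmin 0 + st.2), (0:Int))
        else (st.1, st.2 + (PySem.Dict.counter a).getD gmin 0)) = stepA a := by
    funext st gmin
    simp only [stepA, PySem.Dict.getD_counter]
  rw [h2, PySem.Dict.keys_counter]
  have hmem : ∀ v ∈ PySem.List.sorted (PySem.Set.ofList a) (fun x => x) false, v ∈ a := by
    intro v hv
    rwa [PySem.List.mem_sorted, PySem.Set.mem_ofList] at hv
  have H := (main_inv a (PySem.List.sorted (PySem.Set.ofList a) (fun x => x) false) 0 0 hmem
    le_rfl le_rfl).1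
  rw [show ((0:Int) + 1, (0:Int) - (0:Int)) = ((1:Int), (0:Int)) from by norm_num] at H
  rw [sorted_eq_blocks a, H]
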